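-- pv_equiv track=rewrite | github.com/Ellexium/Power-Plan-Performance-Manager | Power Plan Manager.py | find_balanced_guid
-- ===== SOURCE A (Python) =====
-- def find_balanced_guid(schemes):
--     for s in schemes:
--         if s["name"].strip().lower() == "balanced":
--             return s["guid"]
--     for s in schemes:
--         if s["active"]:
--             return s["guid"]
--     return schemes[0]["guid"] if schemes else None
-- ===== SOURCE B (Python) =====
-- def find_balanced_guid(schemes):
--     # Single pass: return immediately on "balanced"; remember the first active scheme, fall back.
--     first_active = None
--     for s in schemes:
--         if s["name"].strip().lower() == "balanced":
--             return s["guid"]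
--         if first_active is None and s.get("active"):
--             first_active = s
--     if first_active is not None:
--         return first_active["guid"]
--     return schemes[0]["guid"] if schemes else None
-- ===== Notes on version B (the rewrite author's own statement) =====
-- stated objective: alternative
-- what changed: Replaces A's two sequential scans (balanced first, then active) plus an indexing fallback by a single traversal that returns on 'balanced' immediately while remembering the first active scheme in an accumulator.
import Mathlib
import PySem

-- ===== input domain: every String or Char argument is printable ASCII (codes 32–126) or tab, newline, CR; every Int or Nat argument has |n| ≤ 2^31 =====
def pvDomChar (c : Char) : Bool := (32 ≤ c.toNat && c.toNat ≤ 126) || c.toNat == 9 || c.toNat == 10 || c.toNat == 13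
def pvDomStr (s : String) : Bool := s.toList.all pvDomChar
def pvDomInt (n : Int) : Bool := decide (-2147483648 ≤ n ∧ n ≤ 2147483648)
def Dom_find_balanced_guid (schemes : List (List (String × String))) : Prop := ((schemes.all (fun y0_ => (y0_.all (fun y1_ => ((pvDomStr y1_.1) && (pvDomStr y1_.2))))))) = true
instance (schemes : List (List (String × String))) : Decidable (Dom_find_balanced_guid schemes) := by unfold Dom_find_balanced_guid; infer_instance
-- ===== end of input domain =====

-- B replaces A's two sequential scans (balanced, then active) plus an indexing fallback by a
-- single traversal that remembers the first active scheme; same return value wherever A returns.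


-- s[k] / s.get(k): first-match association-list lookup; the "" default marks exactly the spots
-- where the Python raises KeyError (there the Python run is skipped, nothing is claimed).
def pvGet (s : List (String × String)) (k : String) : String := (List.lookup k s).getD ""

-- s["name"].strip().lower() == "balanced"
def pvIsBal (s : List (String × String)) : Bool :=
  PySem.Str.lower (PySem.Str.strip (pvGet s "name")) == "balanced"

-- ===== PORT A =====
-- first loop of A: return s["guid"] on the first "balanced" scheme
def pvALoop1 : List (List (String × String)) → Option String
  | [] => none
  | s :: t => if pvIsBal s then some (pvGet s "guid") else pvALoop1 t

-- second loop of A: return s["guid"] on the first truthy s["active"]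
def pvALoop2 : List (List (String × String)) → Option String
  | [] => none
  | s :: t => if pvGet s "active" != "" then some (pvGet s "guid") else pvALoop2 t

def find_balanced_guid (schemes : List (List (String × String))) : Option String :=
  (pvALoop1 schemes).or ((pvALoop2 schemes).or
    (match schemes with | [] => none | s :: _ => some (pvGet s "guid")))

-- ===== PORT B =====
-- B's single pass: first component = the early return (balanced), second = first_active
def pvBLoop : List (List (String × String)) → Option (List (String × String)) →
    Option String × Option (List (String × String))
  | [], acc => (none, acc)
  | s :: t, acc =>
    if pvIsBal s then (some (pvGet s "guid"), acc)
    else pvBLoop t (if acc.isNone && (pvGet s "active" != "") then some s else acc)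

def find_balanced_guid_alt (schemes : List (List (String × String))) : Option String :=
  match pvBLoop schemes none with
  | (some g, _) => some g
  | (none, some fa) => some (pvGet fa "guid")
  | (none, none) => match schemes with | [] => none | s :: _ => some (pvGet s "guid")

-- ===== PRECONDITION & SPEC =====
-- key present / "balanced" name / truthy "active" — for Pre_ only (independent of the ports)
def pvHasK (s : List (String × String)) (k : String) : Prop := (List.lookup k s).isSome = true
def pvBalP (s : List (String × String)) : Prop :=
  (PySem.Str.lower (PySem.Str.strip ((List.lookup "name" s).getD "")) == "balanced") = true
def pvActP (s : List (String × String)) : Prop := (((List.lookup "active" s).getD "") != "") = true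

-- Pre_: exactly the inputs on which the Python A returns (no KeyError): either a first
-- "balanced" scheme carrying "guid" with "name" present before it, or no balanced scheme,
-- all names present, and the active scan / first-element fallback finds its keys.
def Pre_find_balanced_guid (schemes : List (List (String × String))) : Prop :=
  (∃ i < schemes.length, pvBalP (schemes.getD i []) ∧ pvHasK (schemes.getD i []) "guid" ∧
      ∀ j < i, pvHasK (schemes.getD j []) "name" ∧ ¬ pvBalP (schemes.getD j [])) ∨
  ((∀ s ∈ schemes, pvHasK s "name" ∧ ¬ pvBalP s) ∧
    ((∃ i < schemes.length, pvActP (schemes.getD i []) ∧ pvHasK (schemes.getD i []) "guid" ∧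
        ∀ j < i, pvHasK (schemes.getD j []) "active" ∧ ¬ pvActP (schemes.getD j [])) ∨
      ((∀ s ∈ schemes, pvHasK s "active" ∧ ¬ pvActP s) ∧
        (schemes = [] ∨ pvHasK (schemes.headI) "guid"))))
instance (schemes : List (List (String × String))) : Decidable (Pre_find_balanced_guid schemes) := by
  unfold Pre_find_balanced_guid pvHasK pvBalP pvActP; infer_instance

def pvWitness_find_balanced_guid : (List (List (String × String))) :=
  [[("name", "saver"), ("guid", "g2"), ("active", "")],
   [("name", " Balanced "), ("guid", "g1"), ("active", "1")]]

def Spec_find_balanced_guid (schemes : List (List (String × String))) (out : Option String) : Prop := out = find_balanced_guid_alt schemes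
instance (schemes : List (List (String × String))) (out : Option String) : Decidable (Spec_find_balanced_guid schemes out) := by unfold Spec_find_balanced_guid; infer_instance

-- ===== CLAIM (what is proved, stated in full; the proofs are below) =====
def Claim_equal_find_balanced_guid : Prop := ∀ (schemes : List (List (String × String))), Dom_find_balanced_guid schemes → Pre_find_balanced_guid schemes → Spec_find_balanced_guid schemes (find_balanced_guid schemes)

-- ===== LEMMAS AND PROOFS =====
-- the first scheme with truthy "active" (the scheme itself, not yet its guid)
def pvFirstActive : List (List (String × String)) → Option (List (String × String))
  | [] => none
  | s :: t => if pvGet s "active" != "" then some s else pvFirstActive t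

theorem pvALoop2_eq (l : List (List (String × String))) :
    pvALoop2 l = (pvFirstActive l).map (fun s => pvGet s "guid") := by
  induction l with
  | nil => rfl
  | cons s t ih =>
    simp only [pvALoop2, pvFirstActive]
    by_cases h : pvGet s "active" != "" <;> simp [h, ih]

theorem pvBLoop_fst (l : List (List (String × String))) (acc : Option (List (String × String))) :
    (pvBLoop l acc).1 = pvALoop1 l := by
  induction l generalizing acc with
  | nil => rfl
  | cons s t ih =>
    simp only [pvBLoop, pvALoop1]
    by_cases hb : pvIsBal s <;> simp [hb, ih]

theorem pvBLoop_snd (l : List (List (String × String))) (acc : Option (List (String × String)))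
    (h : pvALoop1 l = none) : (pvBLoop l acc).2 = acc.or (pvFirstActive l) := by
  induction l generalizing acc with
  | nil => cases acc <;> simp [pvBLoop, pvFirstActive]
  | cons s t ih =>
    by_cases hb : pvIsBal s
    · simp [pvALoop1, hb] at h
    · have h' : pvALoop1 t = none := by simpa [pvALoop1, hb] using h
      simp only [pvBLoop, pvFirstActive, hb, Bool.false_eq_true, if_false]
      cases acc <;> by_cases ha : pvGet s "active" != "" <;>
        simp [ha, ih _ h']

theorem find_balanced_guid_spec : Claim_equal_find_balanced_guid := by
  intro schemes _ _
  unfold Spec_find_balanced_guid find_balanced_guid find_balanced_guid_alt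
  cases h1 : pvALoop1 schemes with
  | some g =>
    have hf := pvBLoop_fst schemes none
    rw [h1] at hf
    rcases hp : pvBLoop schemes none with ⟨f, a⟩
    rw [hp] at hf; cases hf
    simp
  | none =>
    have hf := pvBLoop_fst schemes none
    have hs := pvBLoop_snd schemes none h1
    rw [h1] at hf
    rcases hp : pvBLoop schemes none with ⟨f, a⟩
    rw [hp] at hf hs; cases hf
    simp only [Option.or, pvALoop2_eq] at hs ⊢
    cases hfa : pvFirstActive schemes with
    | some fa => rw [hfa] at hs; cases hs; simp
    | none => rw [hfa] at hs; cases hs; simp
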